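-- pv_equiv track=rewrite | github.com/whyj107/Algorithm | Puzzle/030_set_tap.py | set_tap2
-- ===== SOURCE A (Python) =====
-- memo = {1: 1}
--
-- def set_tap2(remain):
--     if remain in memo:
--         return memo[remain]
--     cnt = 0
--     # 2구
--     for i in range(1, remain // 2 + 1):
--         if remain - i == i:
--             cnt += set_tap2(i) * (set_tap2(i) + 1) // 2
--         else:
--             cnt += set_tap2(remain - i) * set_tap2(i)
--     # 3구
--     for i in range(1, remain // 3 + 1):
--         for j in range(i, (remain - i) // 2 + 1):
--             if (remain - (i + j) == i) and (i == j):
--                 cnt += set_tap2(i) * (set_tap2(i) + 1) * (set_tap2(i) + 2) // 6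
--             elif remain - (i + j) == i:
--                 cnt += set_tap2(i) * (set_tap2(i) + 1) * set_tap2(j) // 2
--             elif i == j:
--                 cnt += set_tap2(remain - (i + j)) * set_tap2(i) * (set_tap2(i) + 1) // 2
--             elif remain - (i + j) == j:
--                 cnt += set_tap2(j) * (set_tap2(j) + 1) * set_tap2(i) // 2
--             else:
--                 cnt += set_tap2(remain - (i + j)) * set_tap2(j) * set_tap2(i)
--     memo[remain] = cnt
--     return cnt
-- ===== SOURCE B (Python) =====
-- def set_tap2(remain):
--     # Bottom-up DP via Newton-identity convolutions: s2 = (f*f + p2)/2, s3 = (f*s2 + pp + p3)/3.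
--     if remain < 1:
--         return 0
--     if remain == 1:
--         return 1
--     n = remain
--     f = [0] * (n + 1)
--     s2 = [0] * (n + 1)
--     f[1] = 1
--     for m in range(2, n + 1):
--         c2 = sum(f[a] * f[m - a] for a in range(1, m))
--         p2 = f[m // 2] if m % 2 == 0 else 0
--         s2[m] = (c2 + p2) // 2
--         c3 = sum(f[a] * s2[m - a] for a in range(1, m - 1))
--         pp = sum(f[b] * f[m - 2 * b] for b in range(1, (m - 1) // 2 + 1))
--         p3 = f[m // 3] if m % 3 == 0 else 0
--         f[m] = s2[m] + (c3 + pp + p3) // 3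
--     return f[n]
-- ===== Notes on version B (the rewrite author's own statement) =====
-- stated objective: faster
-- what changed: A's memoized top-down recursion enumerates all sorted 2-part and 3-part splits of every subvalue (O(n^3) work); B builds the table bottom-up and obtains the multiset-weighted 2-part and 3-part sums per value from convolutions via Newton's identities (s2=(f*f+p2)//2, s3=(f*s2+pp+p3)//3), an O(n^2) DP.
import Mathlib
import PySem

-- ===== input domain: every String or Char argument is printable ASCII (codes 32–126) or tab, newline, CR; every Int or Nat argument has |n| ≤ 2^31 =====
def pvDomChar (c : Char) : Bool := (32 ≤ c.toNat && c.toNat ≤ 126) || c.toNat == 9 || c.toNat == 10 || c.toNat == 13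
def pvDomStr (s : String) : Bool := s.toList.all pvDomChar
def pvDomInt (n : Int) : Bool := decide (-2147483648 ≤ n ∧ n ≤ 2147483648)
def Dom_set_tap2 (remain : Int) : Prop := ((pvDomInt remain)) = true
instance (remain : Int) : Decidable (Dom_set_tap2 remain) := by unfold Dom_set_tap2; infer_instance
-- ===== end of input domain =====

-- B replaces A's O(n^3) memoized enumeration of sorted 2/3-part splits by an O(n^2) bottom-up DP
-- that gets the multiset-weighted part sums from convolutions (Newton's identities); return values
-- are identical (A's module-level memo cache is recreated per call in the port: it never changes
-- the returned value, only speed).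

-- ===== PORT A =====
-- A's recursion threaded with its memo dict (`memo = {1: 1}` module constant; the port passes the
-- dict through the loops exactly as Python's shared mutable dict evolves during the recursion).
-- Where Python writes `set_tap2(i) * (set_tap2(i) + 1)`, the second identical call hits the memo
-- just filled by the first and returns the same value, so the port calls once and reuses it.
-- The recursion of A strictly decreases `remain`, so `fuel = remain + 1` bounds its depth;
-- the fuel-0 branch is never reached (a totality guard only, proved by `fAm_correct` below).
def fAm : Nat → Nat → PySem.Dict Nat Int → Int × PySem.Dict Nat Int
  | 0, _, memo => (0, memo)
  | fuel + 1, n, memo =>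
    match memo.get? n with
    | some v => (v, memo)  -- if remain in memo: return memo[remain]
    | none =>
      -- 2구
      let s1 := (List.range' 1 (n / 2)).foldl
        (fun (s : Int × PySem.Dict Nat Int) i =>
          if n - i = i then
            let r := fAm fuel i s.2
            (s.1 + PySem.Int.floordiv (r.1 * (r.1 + 1)) 2, r.2)
          else
            let r1 := fAm fuel (n - i) s.2
            let r2 := fAm fuel i r1.2
            (s.1 + r1.1 * r2.1, r2.2)) (0, memo)
      -- 3구
      let s2 := (List.range' 1 (n / 3)).foldl
        (fun (s : Int × PySem.Dict Nat Int) i =>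
          (List.range' i ((n - i) / 2 + 1 - i)).foldl
            (fun (s : Int × PySem.Dict Nat Int) j =>
              if n - (i + j) = i ∧ i = j then
                let r := fAm fuel i s.2
                (s.1 + PySem.Int.floordiv (r.1 * (r.1 + 1) * (r.1 + 2)) 6, r.2)
              else if n - (i + j) = i then
                let r1 := fAm fuel i s.2
                let r2 := fAm fuel j r1.2
                (s.1 + PySem.Int.floordiv (r1.1 * (r1.1 + 1) * r2.1) 2, r2.2)
              else if i = j then
                let r1 := fAm fuel (n - (i + j)) s.2
                let r2 := fAm fuel i r1.2
                (s.1 + PySem.Int.floordiv (r1.1 * r2.1 * (r2.1 + 1)) 2, r2.2)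
              else if n - (i + j) = j then
                let r1 := fAm fuel j s.2
                let r2 := fAm fuel i r1.2
                (s.1 + PySem.Int.floordiv (r1.1 * (r1.1 + 1) * r2.1) 2, r2.2)
              else
                let r1 := fAm fuel (n - (i + j)) s.2
                let r2 := fAm fuel j r1.2
                let r3 := fAm fuel i r2.2
                (s.1 + r1.1 * r2.1 * r3.1, r3.2)) s) s1
      (s2.1, s2.2.insert n s2.1)  -- memo[remain] = cnt; return cnt

-- For remain ≤ 0 Python's membership test fails and both loops are empty (range(1, k) with k ≤ 1),
-- returning 0, exactly as fAm 0 does; so `.toNat` (which sends remain ≤ 0 to 0) is value-exact.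
def set_tap2 (remain : Int) : Int :=
  (fAm (remain.toNat + 1) remain.toNat (PySem.Dict.empty.insert 1 1)).1

-- ===== PORT B =====
-- Bottom-up table; Python's two preallocated lists f, s2 (only slots 0..m assigned/read at step m)
-- become lists grown by one value per step, read through getD.
-- the body of B's `for m in range(2, n + 1)` loop
def set_tap2_altStep (st : List Int × List Int) (m : Nat) : List Int × List Int :=
  let f := st.1
  let s2 := st.2
  let c2 := ((List.range' 1 (m - 1)).map (fun a => f.getD a 0 * f.getD (m - a) 0)).sum
  let p2 := if m % 2 = 0 then f.getD (m / 2) 0 else 0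
  let s2m := PySem.Int.floordiv (c2 + p2) 2
  let c3 := ((List.range' 1 (m - 2)).map (fun a => f.getD a 0 * s2.getD (m - a) 0)).sum
  let pp := ((List.range' 1 ((m - 1) / 2)).map (fun b => f.getD b 0 * f.getD (m - 2 * b) 0)).sum
  let p3 := if m % 3 = 0 then f.getD (m / 3) 0 else 0
  (f ++ [s2m + PySem.Int.floordiv (c3 + pp + p3) 3], s2 ++ [s2m])

def set_tap2_alt (remain : Int) : Int :=
  if remain < 1 then 0
  else if remain = 1 then 1
  else
    let n := remain.toNat
    let st := (List.range' 2 (n - 1)).foldl set_tap2_altStep ([0, 1], [0, 0])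
    st.1.getD n 0

-- ===== PRECONDITION & SPEC =====
-- A recurses to depth = remain (the i = 1 branch calls set_tap2(remain-1) first), so for every
-- remain ≥ 1000 set_tap2 raises RecursionError under CPython's default recursion limit (verified:
-- remain = 999 returns, remain = 1000 raises); Pre_ excludes exactly those raising inputs — every
-- input on which A returns (including every remain ≤ 0, which returns 0) is kept.
def Pre_set_tap2 (remain : Int) : Prop := remain ≤ 999
instance (remain : Int) : Decidable (Pre_set_tap2 remain) := by unfold Pre_set_tap2; infer_instance
def pvWitness_set_tap2 : Int := (30)

def Spec_set_tap2 (remain : Int) (out : Int) : Prop := out = set_tap2_alt remain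
instance (remain : Int) (out : Int) : Decidable (Spec_set_tap2 remain out) := by unfold Spec_set_tap2; infer_instance

-- ===== CLAIM (what is proved, stated in full; the proofs are below) =====
def Claim_equal_set_tap2 : Prop := ∀ (remain : Int), Dom_set_tap2 remain → Pre_set_tap2 remain → Spec_set_tap2 remain (set_tap2 remain)

-- ===== LEMMAS AND PROOFS =====

-- The clean mathematical recursion both ports compute: FA n = A's count.
def w2t (g : Nat → Int) (n i : Nat) : Int :=
  if n - i = i then PySem.Int.floordiv (g i * (g i + 1)) 2 else g (n - i) * g i

def w3t (g : Nat → Int) (n i j : Nat) : Int :=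
  if n - (i + j) = i ∧ i = j then PySem.Int.floordiv (g i * (g i + 1) * (g i + 2)) 6
  else if n - (i + j) = i then PySem.Int.floordiv (g i * (g i + 1) * g j) 2
  else if i = j then PySem.Int.floordiv (g (n - (i + j)) * g i * (g i + 1)) 2
  else if n - (i + j) = j then PySem.Int.floordiv (g j * (g j + 1) * g i) 2
  else g (n - (i + j)) * g j * g i

def A2sum (g : Nat → Int) (n : Nat) : Int := ∑ i ∈ Finset.Ico 1 (n / 2 + 1), w2t g n i

def A3sum (g : Nat → Int) (n : Nat) : Int :=
  ∑ i ∈ Finset.Ico 1 (n / 3 + 1), ∑ j ∈ Finset.Ico i ((n - i) / 2 + 1), w3t g n i j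

def FA (n : Nat) : Int :=
  if n = 1 then 1
  else A2sum (fun m => if h : m < n then FA m else 0) n
     + A3sum (fun m => if h : m < n then FA m else 0) n
termination_by n

lemma sum_map_range' (f : Nat → Int) (s k : Nat) :
    ((List.range' s k).map f).sum = ∑ i ∈ Finset.Ico s (s + k), f i := by
  induction k with
  | zero => simp
  | succ k ih =>
    rw [List.range'_1_concat, List.map_append, List.sum_append,
        show s + (k + 1) = (s + k) + 1 from rfl, Finset.sum_Ico_succ_top (by omega), ih]
    simp

lemma A2sum_congr {g g' : Nat → Int} (n : Nat) (h : ∀ m, m < n → g m = g' m) :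
    A2sum g n = A2sum g' n := by
  unfold A2sum
  refine Finset.sum_congr rfl fun i hi => ?_
  rw [Finset.mem_Ico] at hi
  unfold w2t
  rw [h i (by omega), h (n - i) (by omega)]

lemma A3sum_congr {g g' : Nat → Int} (n : Nat) (h : ∀ m, m < n → g m = g' m) :
    A3sum g n = A3sum g' n := by
  unfold A3sum
  refine Finset.sum_congr rfl fun i hi => Finset.sum_congr rfl fun j hj => ?_
  rw [Finset.mem_Ico] at hi hj
  unfold w3t
  rw [h i (by omega), h j (by omega), h (n - (i + j)) (by omega)]

lemma FA_eq (n : Nat) (h : n ≠ 1) : FA n = A2sum FA n + A3sum FA n := by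
  rw [FA, if_neg h,
      A2sum_congr n (g' := FA) (fun m hm => dif_pos hm),
      A3sum_congr n (g' := FA) (fun m hm => dif_pos hm)]

lemma FA_zero : FA 0 = 0 := by
  rw [FA_eq 0 (by omega)]
  simp [A2sum, A3sum]
lemma FA_one : FA 1 = 1 := by simp [FA]

-- memo validity
def MemoOK (d : PySem.Dict Nat Int) : Prop :=
  d.get? 1 = some 1 ∧ ∀ k v, d.get? k = some v → v = FA k

lemma memoOK_init : MemoOK (PySem.Dict.empty.insert 1 1) := by
  constructor
  · rw [PySem.Dict.get?_insert]
    simp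
  · intro k v h
    rw [PySem.Dict.get?_insert] at h
    split_ifs at h with heq
    · injection h with h'
      rw [← h', heq, FA_one]
    · rw [PySem.Dict.get?_empty] at h
      exact absurd h (by simp)

lemma memoOK_insert {d : PySem.Dict Nat Int} (h : MemoOK d) {k : Nat} {v : Int}
    (hv : v = FA k) : MemoOK (d.insert k v) := by
  constructor
  · rw [PySem.Dict.get?_insert]
    split_ifs with h1
    · rw [hv, ← h1, FA_one]
    · exact h.1
  · intro k' v' h'
    rw [PySem.Dict.get?_insert] at h'
    split_ifs at h' with heq
    · injection h' with h''
      rw [← h'', hv, heq]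
    · exact h.2 k' v' h'

def IHty (fuel : Nat) : Prop :=
  ∀ m, m < fuel → ∀ d, MemoOK d → (fAm fuel m d).1 = FA m ∧ MemoOK (fAm fuel m d).2

-- named copy of fAm's 2구-loop step function (definitionally equal to fAm's inline lambda;
-- used only to state the loop-invariant lemma)
def stepA2 (fuel n : Nat) (s : Int × PySem.Dict Nat Int) (i : Nat) :
    Int × PySem.Dict Nat Int :=
  if n - i = i then
    let r := fAm fuel i s.2
    (s.1 + PySem.Int.floordiv (r.1 * (r.1 + 1)) 2, r.2)
  else
    let r1 := fAm fuel (n - i) s.2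
    let r2 := fAm fuel i r1.2
    (s.1 + r1.1 * r2.1, r2.2)

lemma loopA2 (fuel n : Nat) (IH : IHty fuel) (hnf : n ≤ fuel) :
    ∀ (l : List Nat), (∀ x ∈ l, 1 ≤ x ∧ 2 * x ≤ n) →
      ∀ (s : Int × PySem.Dict Nat Int), MemoOK s.2 →
      (l.foldl (stepA2 fuel n) s).1 = s.1 + (l.map (fun i => w2t FA n i)).sum
      ∧ MemoOK ((l.foldl (stepA2 fuel n) s).2) := by
  intro l
  induction l with
  | nil => intro _ s hs; exact ⟨by simp, hs⟩
  | cons i t ih =>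
    intro hb s hs
    have hbi := hb i List.mem_cons_self
    have hbt : ∀ x ∈ t, 1 ≤ x ∧ 2 * x ≤ n := fun x hx => hb x (List.mem_cons_of_mem i hx)
    rw [List.foldl_cons]
    have close : (stepA2 fuel n s i).1 = s.1 + w2t FA n i →
        MemoOK (stepA2 fuel n s i).2 →
        (List.foldl (stepA2 fuel n) (stepA2 fuel n s i) t).1
          = s.1 + (List.map (fun i => w2t FA n i) (i :: t)).sum
        ∧ MemoOK ((List.foldl (stepA2 fuel n) (stepA2 fuel n s i) t).2) := by
      intro e1 e2
      obtain ⟨ih1, ih2⟩ := ih hbt (stepA2 fuel n s i) e2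
      refine ⟨?_, ih2⟩
      rw [ih1, e1, List.map_cons, List.sum_cons]
      ring
    by_cases hcase : n - i = i
    · obtain ⟨h1, h2⟩ := IH i (by omega) s.2 hs
      refine close ?_ ?_ <;> (unfold stepA2; rw [if_pos hcase]; dsimp only)
      · rw [h1, w2t, if_pos hcase]
      · exact h2
    · obtain ⟨h1, h2⟩ := IH (n - i) (by omega) s.2 hs
      obtain ⟨h3, h4⟩ := IH i (by omega) (fAm fuel (n - i) s.2).2 h2
      refine close ?_ ?_ <;> (unfold stepA2; rw [if_neg hcase]; dsimp only)
      · rw [h1, h3, w2t, if_neg hcase]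
      · exact h4

-- named copies of fAm's 3구-loop step functions (definitionally equal to the inline lambdas
-- of fAm; used only to state the loop-invariant lemmas)
def stepA3i (fuel n i : Nat) (s : Int × PySem.Dict Nat Int) (j : Nat) :
    Int × PySem.Dict Nat Int :=
  if n - (i + j) = i ∧ i = j then
    let r := fAm fuel i s.2
    (s.1 + PySem.Int.floordiv (r.1 * (r.1 + 1) * (r.1 + 2)) 6, r.2)
  else if n - (i + j) = i then
    let r1 := fAm fuel i s.2
    let r2 := fAm fuel j r1.2
    (s.1 + PySem.Int.floordiv (r1.1 * (r1.1 + 1) * r2.1) 2, r2.2)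
  else if i = j then
    let r1 := fAm fuel (n - (i + j)) s.2
    let r2 := fAm fuel i r1.2
    (s.1 + PySem.Int.floordiv (r1.1 * r2.1 * (r2.1 + 1)) 2, r2.2)
  else if n - (i + j) = j then
    let r1 := fAm fuel j s.2
    let r2 := fAm fuel i r1.2
    (s.1 + PySem.Int.floordiv (r1.1 * (r1.1 + 1) * r2.1) 2, r2.2)
  else
    let r1 := fAm fuel (n - (i + j)) s.2
    let r2 := fAm fuel j r1.2
    let r3 := fAm fuel i r2.2
    (s.1 + r1.1 * r2.1 * r3.1, r3.2)

def stepA3 (fuel n : Nat) (s : Int × PySem.Dict Nat Int) (i : Nat) :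
    Int × PySem.Dict Nat Int :=
  (List.range' i ((n - i) / 2 + 1 - i)).foldl (stepA3i fuel n i) s

lemma loopA3i (fuel n i : Nat) (IH : IHty fuel) (hnf : n ≤ fuel) (hi : 1 ≤ i) :
    ∀ (l : List Nat), (∀ y ∈ l, i ≤ y ∧ i + 2 * y ≤ n) →
      ∀ (s : Int × PySem.Dict Nat Int), MemoOK s.2 →
      (l.foldl (stepA3i fuel n i) s).1 = s.1 + (l.map (fun j => w3t FA n i j)).sum
      ∧ MemoOK ((l.foldl (stepA3i fuel n i) s).2) := by
  intro l
  induction l with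
  | nil => intro _ s hs; exact ⟨by simp, hs⟩
  | cons j t ih =>
    intro hb s hs
    have hbj := hb j List.mem_cons_self
    have hbt : ∀ y ∈ t, i ≤ y ∧ i + 2 * y ≤ n := fun y hy => hb y (List.mem_cons_of_mem j hy)
    rw [List.foldl_cons]
    have close : (stepA3i fuel n i s j).1 = s.1 + w3t FA n i j →
        MemoOK (stepA3i fuel n i s j).2 →
        (List.foldl (stepA3i fuel n i) (stepA3i fuel n i s j) t).1
          = s.1 + (List.map (fun j => w3t FA n i j) (j :: t)).sum
        ∧ MemoOK ((List.foldl (stepA3i fuel n i) (stepA3i fuel n i s j) t).2) := by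
      intro e1 e2
      obtain ⟨ih1, ih2⟩ := ih hbt (stepA3i fuel n i s j) e2
      refine ⟨?_, ih2⟩
      rw [ih1, e1, List.map_cons, List.sum_cons]
      ring
    by_cases h1 : n - (i + j) = i ∧ i = j
    · obtain ⟨hA1, hA2⟩ := IH i (by omega) s.2 hs
      refine close ?_ ?_ <;> (unfold stepA3i; rw [if_pos h1]; dsimp only)
      · rw [hA1, w3t, if_pos h1]
      · exact hA2
    · by_cases h2 : n - (i + j) = i
      · obtain ⟨hA1, hA2⟩ := IH i (by omega) s.2 hs
        obtain ⟨hB1, hB2⟩ := IH j (by omega) (fAm fuel i s.2).2 hA2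
        refine close ?_ ?_ <;> (unfold stepA3i; rw [if_neg h1, if_pos h2]; dsimp only)
        · rw [hA1, hB1, w3t, if_neg h1, if_pos h2]
        · exact hB2
      · by_cases h3 : i = j
        · obtain ⟨hA1, hA2⟩ := IH (n - (i + j)) (by omega) s.2 hs
          obtain ⟨hB1, hB2⟩ := IH i (by omega) (fAm fuel (n - (i + j)) s.2).2 hA2
          refine close ?_ ?_ <;>
            (unfold stepA3i; rw [if_neg h1, if_neg h2, if_pos h3]; dsimp only)
          · rw [hA1, hB1, w3t, if_neg h1, if_neg h2, if_pos h3]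
          · exact hB2
        · by_cases h4 : n - (i + j) = j
          · obtain ⟨hA1, hA2⟩ := IH j (by omega) s.2 hs
            obtain ⟨hB1, hB2⟩ := IH i (by omega) (fAm fuel j s.2).2 hA2
            refine close ?_ ?_ <;>
              (unfold stepA3i; rw [if_neg h1, if_neg h2, if_neg h3, if_pos h4]; dsimp only)
            · rw [hA1, hB1, w3t, if_neg h1, if_neg h2, if_neg h3, if_pos h4]
            · exact hB2
          · obtain ⟨hA1, hA2⟩ := IH (n - (i + j)) (by omega) s.2 hs
            obtain ⟨hB1, hB2⟩ := IH j (by omega) (fAm fuel (n - (i + j)) s.2).2 hA2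
            obtain ⟨hC1, hC2⟩ := IH i (by omega) (fAm fuel j (fAm fuel (n - (i + j)) s.2).2).2 hB2
            refine close ?_ ?_ <;>
              (unfold stepA3i; rw [if_neg h1, if_neg h2, if_neg h3, if_neg h4]; dsimp only)
            · rw [hA1, hB1, hC1, w3t, if_neg h1, if_neg h2, if_neg h3, if_neg h4]
            · exact hC2

lemma loopA3 (fuel n : Nat) (IH : IHty fuel) (hnf : n ≤ fuel) :
    ∀ (l : List Nat), (∀ x ∈ l, 1 ≤ x) →
      ∀ (s : Int × PySem.Dict Nat Int), MemoOK s.2 →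
      (l.foldl (stepA3 fuel n) s).1
        = s.1 + (l.map (fun i =>
            ((List.range' i ((n - i) / 2 + 1 - i)).map (fun j => w3t FA n i j)).sum)).sum
      ∧ MemoOK ((l.foldl (stepA3 fuel n) s).2) := by
  intro l
  induction l with
  | nil => intro _ s hs; exact ⟨by simp, hs⟩
  | cons i t ih =>
    intro hb s hs
    have hbi := hb i List.mem_cons_self
    have hbt : ∀ x ∈ t, 1 ≤ x := fun x hx => hb x (List.mem_cons_of_mem i hx)
    rw [List.foldl_cons]
    have hinner := loopA3i fuel n i IH hnf hbi (List.range' i ((n - i) / 2 + 1 - i))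
      (by intro y hy; rw [List.mem_range'_1] at hy; omega) s hs
    have e1 : (stepA3 fuel n s i).1 = s.1
        + ((List.range' i ((n - i) / 2 + 1 - i)).map (fun j => w3t FA n i j)).sum := by
      rw [stepA3]
      exact hinner.1
    have e2 : MemoOK (stepA3 fuel n s i).2 := by
      rw [stepA3]
      exact hinner.2
    obtain ⟨ih1, ih2⟩ := ih hbt (stepA3 fuel n s i) e2
    refine ⟨?_, ih2⟩
    rw [ih1, e1, List.map_cons, List.sum_cons]
    ring

lemma Ico_norm (a b : Nat) : Finset.Ico a (a + (b - a)) = Finset.Ico a b := by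
  ext x
  simp only [Finset.mem_Ico]
  omega

lemma fAm_correct : ∀ (fuel n : Nat), n < fuel → ∀ (d : PySem.Dict Nat Int), MemoOK d →
    (fAm fuel n d).1 = FA n ∧ MemoOK (fAm fuel n d).2 := by
  intro fuel
  induction fuel with
  | zero => intro n hn; omega
  | succ fuel IH =>
    intro n hn d hd
    have IH' : IHty fuel := fun m hm => IH m hm
    rw [fAm]
    cases hlook : d.get? n with
    | some v =>
      exact ⟨hd.2 n v hlook, hd⟩
    | none =>
      have hne1 : n ≠ 1 := by
        intro h
        rw [h, hd.1] at hlook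
        cases hlook
      suffices h : ∀ S1 : Int × PySem.Dict Nat Int,
          S1 = List.foldl (stepA2 fuel n) (0, d) (List.range' 1 (n / 2)) →
          ∀ S2 : Int × PySem.Dict Nat Int,
          S2 = List.foldl (stepA3 fuel n) S1 (List.range' 1 (n / 3)) →
          S2.1 = FA n ∧ MemoOK (S2.2.insert n S2.1) by
        exact h _ rfl _ rfl
      intro S1 hS1 S2 hS2
      obtain ⟨u1, u2⟩ := loopA2 fuel n IH' (by omega) (List.range' 1 (n / 2))
        (by intro x hx; rw [List.mem_range'_1] at hx; omega) (0, d) hd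
      rw [← hS1] at u1 u2
      obtain ⟨v1, v2⟩ := loopA3 fuel n IH' (by omega) (List.range' 1 (n / 3))
        (by intro x hx; rw [List.mem_range'_1] at hx; omega) S1 u2
      rw [← hS2] at v1 v2
      have hsum2 : ((List.range' 1 (n / 2)).map (fun i => w2t FA n i)).sum
          = A2sum FA n := by
        rw [sum_map_range', A2sum, show 1 + n / 2 = n / 2 + 1 from by omega]
      have hsum3 : ((List.range' 1 (n / 3)).map (fun i =>
            ((List.range' i ((n - i) / 2 + 1 - i)).map (fun j => w3t FA n i j)).sum)).sum
          = A3sum FA n := by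
        rw [sum_map_range', A3sum, show 1 + n / 3 = n / 3 + 1 from by omega]
        refine Finset.sum_congr rfl fun i _ => ?_
        rw [sum_map_range', Ico_norm]
      have hval : S2.1 = FA n := by
        rw [v1, u1, hsum2, hsum3, FA_eq n hne1]
        ring
      exact ⟨hval, memoOK_insert v2 hval⟩

-- convolution side
def C2s (g : Nat → Int) (m : Nat) : Int := ∑ a ∈ Finset.Ico 1 m, g a * g (m - a)
def P2v (g : Nat → Int) (m : Nat) : Int := if m % 2 = 0 then g (m / 2) else 0
def C3s (g : Nat → Int) (m : Nat) : Int := ∑ a ∈ Finset.Ico 1 (m - 1), g a * A2sum g (m - a)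
def PPv (g : Nat → Int) (m : Nat) : Int := ∑ b ∈ Finset.Ico 1 ((m - 1) / 2 + 1), g b * g (m - 2 * b)
def P3v (g : Nat → Int) (m : Nat) : Int := if m % 3 = 0 then g (m / 3) else 0

lemma fdiv_two_even (x : Int) : 2 * PySem.Int.floordiv (x * (x + 1)) 2 = x * (x + 1) := by
  obtain ⟨c, hc⟩ := Int.even_mul_succ_self x
  rw [PySem.Int.floordiv_eq_ediv_of_pos (by norm_num), hc, show c + c = 2 * c by ring,
      Int.mul_ediv_cancel_left _ (by norm_num)]

lemma two_mul_A2 (g : Nat → Int) (n : Nat) (hn : 1 ≤ n) :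
    C2s g n + P2v g n = 2 * A2sum g n := by
  by_cases h1 : n = 1
  · subst h1; simp [C2s, P2v, A2sum]
  have hn2 : 2 ≤ n := by omega
  have hsplit := Finset.sum_Ico_consecutive (fun a => g a * g (n - a))
      (m := 1) (n := n / 2 + 1) (k := n) (by omega) (by omega)
  have hupper : ∑ a ∈ Finset.Ico (n / 2 + 1) n, g a * g (n - a)
      = ∑ j ∈ Finset.Ico 1 (n - n / 2), g (n - j) * g j := by
    refine Finset.sum_nbij' (fun a => n - a) (fun j => n - j) ?_ ?_ ?_ ?_ ?_ <;>
      (intro a ha; simp only [Finset.mem_Ico] at ha ⊢) <;> try omega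
    rw [show n - (n - a) = a by omega]
  have hup2 : ∑ j ∈ Finset.Ico 1 (n - n / 2), g (n - j) * g j
      = ∑ j ∈ Finset.Ico 1 (n / 2 + 1), if n - j = j then 0 else g (n - j) * g j := by
    have hset : Finset.Ico 1 (n - n / 2)
        = (Finset.Ico 1 (n / 2 + 1)).filter (fun j => ¬(n - j = j)) := by
      ext j
      simp only [Finset.mem_Ico, Finset.mem_filter]
      omega
    rw [hset, Finset.sum_filter]
    exact Finset.sum_congr rfl fun j _ => by rw [ite_not]
  have hp2 : P2v g n = ∑ j ∈ Finset.Ico 1 (n / 2 + 1), if n - j = j then g j else 0 := by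
    rw [← Finset.sum_filter]
    unfold P2v
    by_cases he : n % 2 = 0
    · rw [if_pos he, show (Finset.Ico 1 (n / 2 + 1)).filter (fun j => n - j = j)
          = {n / 2} from by
            ext j
            simp only [Finset.mem_Ico, Finset.mem_filter, Finset.mem_singleton]
            omega,
        Finset.sum_singleton]
    · rw [if_neg he, show (Finset.Ico 1 (n / 2 + 1)).filter (fun j => n - j = j)
          = ∅ from by
            ext j
            simp only [Finset.mem_Ico, Finset.mem_filter, Finset.notMem_empty, iff_false, not_and]
            omega,
        Finset.sum_empty]
  unfold C2s
  rw [← hsplit, hupper, hup2, hp2, A2sum, Finset.mul_sum, ← Finset.sum_add_distrib,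
      ← Finset.sum_add_distrib]
  refine Finset.sum_congr rfl fun i hi => ?_
  rw [Finset.mem_Ico] at hi
  unfold w2t
  by_cases hd : n - i = i
  · rw [if_pos hd, if_pos hd, if_pos hd, fdiv_two_even, show n - i = i from hd]
    ring
  · rw [if_neg hd, if_neg hd, if_neg hd]
    ring


lemma A2_fdiv (g : Nat → Int) (n : Nat) (hn : 1 ≤ n) :
    PySem.Int.floordiv (C2s g n + P2v g n) 2 = A2sum g n := by
  rw [two_mul_A2 g n hn, PySem.Int.floordiv_eq_ediv_of_pos (by norm_num)]
  exact Int.mul_ediv_cancel_left _ (by norm_num)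

def Aset (n : Nat) : Finset (Nat × Nat) :=
  (Finset.Ico 1 n ×ˢ Finset.Ico 1 n).filter (fun p => p.1 ≤ p.2 ∧ p.1 + 2 * p.2 ≤ n)

lemma mem_Aset {n : Nat} {p : Nat × Nat} :
    p ∈ Aset n ↔ 1 ≤ p.1 ∧ p.1 ≤ p.2 ∧ p.1 + 2 * p.2 ≤ n := by
  obtain ⟨i, j⟩ := p
  simp only [Aset, Finset.mem_filter, Finset.mem_product, Finset.mem_Ico]
  omega

-- A's double loop as a sum over the sorted index set
lemma A3_flat (g : Nat → Int) (n : Nat) (hn : 2 ≤ n) :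
    A3sum g n = ∑ p ∈ Aset n, w3t g n p.1 p.2 := by
  rw [Aset, Finset.sum_filter, Finset.sum_product]
  have h1 : ∀ i ∈ Finset.Ico 1 n,
      (∑ j ∈ Finset.Ico 1 n, if i ≤ j ∧ i + 2 * j ≤ n then w3t g n i j else 0)
      = ∑ j ∈ Finset.Ico i ((n - i) / 2 + 1), w3t g n i j := by
    intro i hi
    rw [Finset.mem_Ico] at hi
    rw [← Finset.sum_filter,
        show (Finset.Ico 1 n).filter (fun j => i ≤ j ∧ i + 2 * j ≤ n)
          = Finset.Ico i ((n - i) / 2 + 1) from by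
          ext j; simp only [Finset.mem_filter, Finset.mem_Ico]; omega]
  rw [Finset.sum_congr rfl h1]
  refine (Finset.sum_subset (by intro i hi; rw [Finset.mem_Ico] at *; omega) ?_)
  intro i hi hni
  rw [Finset.mem_Ico] at hi hni
  rw [Finset.Ico_eq_empty (by omega), Finset.sum_empty]

lemma conv_flat (g : Nat → Int) (n : Nat) (hn : 2 ≤ n) :
    C3s g n = ∑ p ∈ (Finset.Ico 1 n ×ˢ Finset.Ico 1 n).filter (fun p => p.1 + 2 * p.2 ≤ n),
      g p.1 * w2t g (n - p.1) p.2 := by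
  rw [Finset.sum_filter, Finset.sum_product]
  have h1 : ∀ a ∈ Finset.Ico 1 n,
      (∑ j ∈ Finset.Ico 1 n, if a + 2 * j ≤ n then g a * w2t g (n - a) j else 0)
      = g a * A2sum g (n - a) := by
    intro a ha
    rw [Finset.mem_Ico] at ha
    rw [← Finset.sum_filter,
        show (Finset.Ico 1 n).filter (fun j => a + 2 * j ≤ n)
          = Finset.Ico 1 ((n - a) / 2 + 1) from by
          ext j; simp only [Finset.mem_filter, Finset.mem_Ico]; omega,
        A2sum, Finset.mul_sum]
  rw [Finset.sum_congr rfl h1, C3s]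
  refine Finset.sum_subset (by intro a ha; rw [Finset.mem_Ico] at *; omega) ?_
  intro a ha hna
  rw [Finset.mem_Ico] at ha hna
  rw [show n - a = 1 from by omega]
  simp [A2sum]

lemma conv_regions (g : Nat → Int) (n : Nat) (hn : 2 ≤ n) :
    ∑ p ∈ (Finset.Ico 1 n ×ˢ Finset.Ico 1 n).filter (fun p => p.1 + 2 * p.2 ≤ n),
      g p.1 * w2t g (n - p.1) p.2
    = ∑ q ∈ Aset n, g q.1 * w2t g (n - q.1) q.2
    + ∑ q ∈ (Aset n).filter (fun q => q.1 < q.2), g q.2 * w2t g (n - q.2) q.1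
    + ∑ q ∈ (Aset n).filter (fun q => q.2 < n - q.1 - q.2),
        g (n - q.1 - q.2) * w2t g (q.1 + q.2) q.1 := by
  set S := (Finset.Ico 1 n ×ˢ Finset.Ico 1 n).filter (fun p => p.1 + 2 * p.2 ≤ n) with hS
  have hmemS : ∀ p : Nat × Nat, p ∈ S ↔ 1 ≤ p.1 ∧ 1 ≤ p.2 ∧ p.1 + 2 * p.2 ≤ n := by
    intro ⟨a, b⟩
    simp only [hS, Finset.mem_filter, Finset.mem_product, Finset.mem_Ico]
    omega
  rw [← Finset.sum_filter_add_sum_filter_not S (fun p => p.1 ≤ p.2),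
      ← Finset.sum_filter_add_sum_filter_not (S.filter (fun p => ¬ p.1 ≤ p.2))
          (fun p => 2 * p.1 + p.2 ≤ n)]
  have e1 : S.filter (fun p => p.1 ≤ p.2) = Aset n := by
    ext p
    rw [Finset.mem_filter, hmemS, mem_Aset]
    omega
  have e2 : ∑ p ∈ (S.filter (fun p => ¬ p.1 ≤ p.2)).filter (fun p => 2 * p.1 + p.2 ≤ n),
        g p.1 * w2t g (n - p.1) p.2
      = ∑ q ∈ (Aset n).filter (fun q => q.1 < q.2), g q.2 * w2t g (n - q.2) q.1 := by
    refine Finset.sum_nbij' (fun p => (p.2, p.1)) (fun q => (q.2, q.1)) ?_ ?_ ?_ ?_ ?_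
    · intro p hp
      obtain ⟨a, b⟩ := p
      simp only [Finset.mem_filter, hmemS, mem_Aset] at hp ⊢
      omega
    · intro q hq
      obtain ⟨i, j⟩ := q
      simp only [Finset.mem_filter, hmemS, mem_Aset] at hq ⊢
      omega
    · intro p _
      rfl
    · intro q _
      rfl
    · intro p _
      rfl
  have e3 : ∑ p ∈ (S.filter (fun p => ¬ p.1 ≤ p.2)).filter (fun p => ¬ 2 * p.1 + p.2 ≤ n),
        g p.1 * w2t g (n - p.1) p.2
      = ∑ q ∈ (Aset n).filter (fun q => q.2 < n - q.1 - q.2),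
          g (n - q.1 - q.2) * w2t g (q.1 + q.2) q.1 := by
    refine Finset.sum_nbij' (fun p => (p.2, n - p.1 - p.2)) (fun q => (n - q.1 - q.2, q.1))
      ?_ ?_ ?_ ?_ ?_
    · intro p hp
      obtain ⟨a, b⟩ := p
      simp only [Finset.mem_filter, hmemS, mem_Aset] at hp ⊢
      omega
    · intro q hq
      obtain ⟨i, j⟩ := q
      simp only [Finset.mem_filter, hmemS, mem_Aset] at hq ⊢
      omega
    · intro p hp
      obtain ⟨a, b⟩ := p
      simp only [Finset.mem_filter, hmemS, mem_Aset] at hp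
      refine Prod.ext ?_ ?_ <;> dsimp only <;> omega
    · intro q hq
      obtain ⟨i, j⟩ := q
      simp only [Finset.mem_filter, hmemS, mem_Aset] at hq
      refine Prod.ext ?_ ?_ <;> dsimp only <;> omega
    · intro p hp
      obtain ⟨a, b⟩ := p
      simp only [Finset.mem_filter, hmemS, mem_Aset] at hp
      simp only
      rw [show n - b - (n - a - b) = a from by omega,
          show b + (n - a - b) = n - a from by omega]
  rw [e1, e2, e3]
  ring

lemma PP_regions (g : Nat → Int) (n : Nat) (hn : 2 ≤ n) :
    PPv g n
    = ∑ q ∈ (Aset n).filter (fun q => q.1 = q.2), g q.1 * g (n - q.1 - q.2)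
    + ∑ q ∈ (Aset n).filter (fun q => q.1 < q.2 ∧ q.1 + 2 * q.2 = n), g q.2 * g q.1 := by
  rw [PPv, ← Finset.sum_filter_add_sum_filter_not (Finset.Ico 1 ((n - 1) / 2 + 1))
      (fun b => 3 * b ≤ n)]
  have e1 : ∑ b ∈ (Finset.Ico 1 ((n - 1) / 2 + 1)).filter (fun b => 3 * b ≤ n),
        g b * g (n - 2 * b)
      = ∑ q ∈ (Aset n).filter (fun q => q.1 = q.2), g q.1 * g (n - q.1 - q.2) := by
    refine Finset.sum_nbij' (fun b => (b, b)) (fun q => q.1) ?_ ?_ ?_ ?_ ?_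
    · intro b hb
      simp only [Finset.mem_filter, Finset.mem_Ico, mem_Aset] at hb ⊢
      exact ⟨by omega, trivial⟩
    · intro q hq
      obtain ⟨i, j⟩ := q
      simp only [Finset.mem_filter, Finset.mem_Ico, mem_Aset] at hq ⊢
      omega
    · intro b _; rfl
    · intro q hq
      obtain ⟨i, j⟩ := q
      simp only [Finset.mem_filter, mem_Aset] at hq
      refine Prod.ext ?_ ?_ <;> dsimp only <;> omega
    · intro b hb
      simp only
      rw [show n - b - b = n - 2 * b from by omega]
  have e2 : ∑ b ∈ (Finset.Ico 1 ((n - 1) / 2 + 1)).filter (fun b => ¬ 3 * b ≤ n),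
        g b * g (n - 2 * b)
      = ∑ q ∈ (Aset n).filter (fun q => q.1 < q.2 ∧ q.1 + 2 * q.2 = n), g q.2 * g q.1 := by
    refine Finset.sum_nbij' (fun b => (n - 2 * b, b)) (fun q => q.2) ?_ ?_ ?_ ?_ ?_
    · intro b hb
      beta_reduce
      simp only [Finset.mem_filter, Finset.mem_Ico, mem_Aset] at hb ⊢
      omega
    · intro q hq
      obtain ⟨i, j⟩ := q
      simp only [Finset.mem_filter, Finset.mem_Ico, mem_Aset] at hq ⊢
      omega
    · intro b _; rfl
    · intro q hq
      obtain ⟨i, j⟩ := q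
      simp only [Finset.mem_filter, mem_Aset] at hq
      refine Prod.ext ?_ ?_ <;> dsimp only <;> omega
    · intro b _; rfl
  rw [e1, e2]

lemma P3_region (g : Nat → Int) (n : Nat) (hn : 2 ≤ n) :
    P3v g n = ∑ q ∈ (Aset n).filter (fun q => q.1 = q.2 ∧ q.1 + 2 * q.2 = n), g q.1 := by
  rw [P3v]
  by_cases h3 : n % 3 = 0
  · rw [if_pos h3,
        show (Aset n).filter (fun q => q.1 = q.2 ∧ q.1 + 2 * q.2 = n) = {(n / 3, n / 3)} from by
          ext ⟨i, j⟩
          simp only [Finset.mem_filter, mem_Aset, Finset.mem_singleton, Prod.mk.injEq]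
          omega,
        Finset.sum_singleton]
  · rw [if_neg h3,
        show (Aset n).filter (fun q => q.1 = q.2 ∧ q.1 + 2 * q.2 = n) = ∅ from by
          ext ⟨i, j⟩
          simp only [Finset.mem_filter, mem_Aset, Finset.notMem_empty, iff_false, not_and]
          omega,
        Finset.sum_empty]
lemma cellA (x : Int) : x * PySem.Int.floordiv (x*(x+1)) 2 + x*x + x = 3 * PySem.Int.floordiv (x*(x+1)*(x+2)) 6 := by
  obtain ⟨c, hc⟩ := Int.even_mul_succ_self x
  have hc2 : x*(x+1) = 2*c := by linarith
  have h2 : (2:ℤ) ∣ x*(x+1)*(x+2) := ⟨c*(x+2), by linear_combination (x+2) * hc2⟩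
  have h3 : (3:ℤ) ∣ x*(x+1)*(x+2) := by
    have h := show (3:ℤ) ∣ x ∨ (3:ℤ) ∣ (x+1) ∨ (3:ℤ) ∣ (x+2) by omega
    rcases h with h|h|h
    · exact dvd_mul_of_dvd_left (dvd_mul_of_dvd_left h _) _
    · exact dvd_mul_of_dvd_left (dvd_mul_of_dvd_right h _) _
    · exact dvd_mul_of_dvd_right h _
  obtain ⟨d, hd⟩ := show (6:ℤ) ∣ x*(x+1)*(x+2) by omega
  rw [hd, PySem.Int.floordiv_eq_ediv_of_pos (by norm_num : (0:ℤ) < 6),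
      Int.mul_ediv_cancel_left _ (by norm_num : (6:ℤ) ≠ 0),
      hc2, PySem.Int.floordiv_eq_ediv_of_pos (by norm_num : (0:ℤ) < 2),
      Int.mul_ediv_cancel_left _ (by norm_num : (2:ℤ) ≠ 0)]
  have h : 2*(x*c + x*x + x) = 2*(3*d) := by linear_combination hd - x*hc2
  linarith

lemma cellB (x K : Int) : x*(K*x) + K * PySem.Int.floordiv (x*(x+1)) 2 + x*K
    = 3 * PySem.Int.floordiv (K*x*(x+1)) 2 := by
  obtain ⟨c, hc⟩ := Int.even_mul_succ_self x
  have hc2 : x*(x+1) = 2*c := by linarith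
  rw [show K*x*(x+1) = 2*(K*c) by linear_combination K * hc2, hc2,
      PySem.Int.floordiv_eq_ediv_of_pos (by norm_num : (0:ℤ) < 2),
      PySem.Int.floordiv_eq_ediv_of_pos (by norm_num : (0:ℤ) < 2),
      Int.mul_ediv_cancel_left _ (by norm_num : (2:ℤ) ≠ 0),
      Int.mul_ediv_cancel_left _ (by norm_num : (2:ℤ) ≠ 0)]
  linear_combination K * hc2

lemma cellC (x y : Int) : x * PySem.Int.floordiv (y*(y+1)) 2 + y*(y*x) + y*x
    = 3 * PySem.Int.floordiv (y*(y+1)*x) 2 := by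
  obtain ⟨c, hc⟩ := Int.even_mul_succ_self y
  have hc2 : y*(y+1) = 2*c := by linarith
  rw [show y*(y+1)*x = 2*(c*x) by linear_combination x * hc2, hc2,
      PySem.Int.floordiv_eq_ediv_of_pos (by norm_num : (0:ℤ) < 2),
      PySem.Int.floordiv_eq_ediv_of_pos (by norm_num : (0:ℤ) < 2),
      Int.mul_ediv_cancel_left _ (by norm_num : (2:ℤ) ≠ 0),
      Int.mul_ediv_cancel_left _ (by norm_num : (2:ℤ) ≠ 0)]
  linear_combination x * hc2

lemma cell_main (g : Nat → Int) (n i j : Nat) (h1 : 1 ≤ i) (h2 : i ≤ j) (h3 : i + 2 * j ≤ n) :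
    g i * w2t g (n - i) j
    + (if i < j then g j * w2t g (n - j) i else 0)
    + (if j < n - i - j then g (n - i - j) * w2t g (i + j) i else 0)
    + (if i = j then g i * g (n - i - j) else 0)
    + (if i < j ∧ i + 2 * j = n then g j * g i else 0)
    + (if i = j ∧ i + 2 * j = n then g i else 0)
    = 3 * w3t g n i j := by
  have hk : n - i - j = n - (i + j) := by omega
  by_cases hij : i = j <;> by_cases hjn : i + 2 * j = n
  · -- i = j = k
    rw [w3t, if_pos (by omega : n - (i + j) = i ∧ i = j), w2t,
        if_pos (by omega : n - i - j = j), if_neg (by omega : ¬ i < j),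
        if_neg (by omega : ¬ j < n - i - j), if_pos hij, if_neg (by omega : ¬ (i < j ∧ i + 2 * j = n)),
        if_pos ⟨hij, hjn⟩, show n - i - j = i from by omega, ← hij]
    simpa using cellA (g i)
  · -- i = j < k
    rw [w3t, if_neg (by omega : ¬ (n - (i + j) = i ∧ i = j)), if_neg (by omega : ¬ n - (i + j) = i),
        if_pos hij, w2t, if_neg (by omega : ¬ n - i - j = j),
        if_neg (by omega : ¬ i < j), if_pos (by omega : j < n - i - j), if_pos hij,
        if_neg (by omega : ¬ (i < j ∧ i + 2 * j = n)), if_neg (by omega : ¬ (i = j ∧ i + 2 * j = n)),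
        w2t, if_pos (by omega : i + j - i = i), show n - i - j = n - (i + j) from by omega, ← hij]
    simpa using cellB (g i) (g (n - (i + i)))
  · -- i < j = k
    rw [w3t, if_neg (by omega : ¬ (n - (i + j) = i ∧ i = j)), if_neg (by omega : ¬ n - (i + j) = i),
        if_neg hij, if_pos (by omega : n - (i + j) = j),
        w2t, if_pos (by omega : n - i - j = j),
        if_pos (by omega : i < j), w2t, if_neg (by omega : ¬ n - j - i = i),
        show n - j - i = j from by omega,
        if_neg (by omega : ¬ j < n - i - j), if_neg hij,
        if_pos ⟨by omega, hjn⟩, if_neg (by omega : ¬ (i = j ∧ i + 2 * j = n))]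
    simpa using cellC (g i) (g j)
  · -- i < j < k  (or i<j, j<k with all distinct)
    rw [w3t, if_neg (by omega : ¬ (n - (i + j) = i ∧ i = j)), if_neg (by omega : ¬ n - (i + j) = i),
        if_neg hij, if_neg (by omega : ¬ n - (i + j) = j),
        w2t, if_neg (by omega : ¬ n - i - j = j), show n - i - j = n - (i + j) from by omega,
        if_pos (by omega : i < j), w2t, if_neg (by omega : ¬ n - j - i = i),
        show n - j - i = n - (i + j) from by omega,
        if_pos (by omega : j < n - (i + j)), w2t, if_neg (by omega : ¬ i + j - i = i),
        show i + j - i = j from by omega,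
        if_neg hij, if_neg (by omega : ¬ (i < j ∧ i + 2 * j = n)),
        if_neg (by omega : ¬ (i = j ∧ i + 2 * j = n))]
    ring


lemma three_mul_A3 (g : Nat → Int) (n : Nat) (hn : 2 ≤ n) :
    C3s g n + PPv g n + P3v g n = 3 * A3sum g n := by
  rw [conv_flat g n hn, conv_regions g n hn, PP_regions g n hn, P3_region g n hn,
      A3_flat g n hn, Finset.mul_sum,
      Finset.sum_filter, Finset.sum_filter, Finset.sum_filter, Finset.sum_filter,
      Finset.sum_filter, ← Finset.sum_add_distrib, ← Finset.sum_add_distrib,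
      ← Finset.sum_add_distrib, ← Finset.sum_add_distrib, ← Finset.sum_add_distrib]
  refine Finset.sum_congr rfl fun q hq => ?_
  obtain ⟨i, j⟩ := q
  rw [mem_Aset] at hq
  have := cell_main g n i j hq.1 hq.2.1 hq.2.2
  linarith


lemma A3_fdiv (g : Nat → Int) (n : Nat) (hn : 2 ≤ n) :
    PySem.Int.floordiv (C3s g n + PPv g n + P3v g n) 3 = A3sum g n := by
  rw [three_mul_A3 g n hn, PySem.Int.floordiv_eq_ediv_of_pos (by norm_num)]
  exact Int.mul_ediv_cancel_left _ (by norm_num)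

-- B's table values
def S2F (m : Nat) : Int := if m < 2 then 0 else A2sum FA m

lemma bstep_eq (m : Nat) (hm : 2 ≤ m) :
    set_tap2_altStep ((List.range m).map FA, (List.range m).map S2F) m
    = ((List.range (m + 1)).map FA, (List.range (m + 1)).map S2F) := by
  unfold set_tap2_altStep
  dsimp only
  have hc2 : ((List.range' 1 (m - 1)).map
        (fun a => ((List.range m).map FA).getD a 0 * ((List.range m).map FA).getD (m - a) 0)).sum
      = C2s FA m := by
    have e : ∀ a ∈ List.range' 1 (m - 1),
        ((List.range m).map FA).getD a 0 * ((List.range m).map FA).getD (m - a) 0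
        = FA a * FA (m - a) := by
      intro a ha
      rw [List.mem_range'_1] at ha
      rw [PySem.List.getD_map_range _ _ _ _ (by omega), PySem.List.getD_map_range _ _ _ _ (by omega)]
    rw [List.map_congr_left e, sum_map_range', show 1 + (m - 1) = m from by omega, C2s]
  have hp2 : (if m % 2 = 0 then ((List.range m).map FA).getD (m / 2) 0 else 0) = P2v FA m := by
    unfold P2v
    split_ifs
    · exact PySem.List.getD_map_range _ _ _ _ (by omega)
    · rfl
  have hc3 : ((List.range' 1 (m - 2)).map
        (fun a => ((List.range m).map FA).getD a 0 * ((List.range m).map S2F).getD (m - a) 0)).sum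
      = C3s FA m := by
    have e : ∀ a ∈ List.range' 1 (m - 2),
        ((List.range m).map FA).getD a 0 * ((List.range m).map S2F).getD (m - a) 0
        = FA a * A2sum FA (m - a) := by
      intro a ha
      rw [List.mem_range'_1] at ha
      rw [PySem.List.getD_map_range _ _ _ _ (by omega), PySem.List.getD_map_range _ _ _ _ (by omega),
          S2F, if_neg (by omega : ¬ m - a < 2)]
    rw [List.map_congr_left e, sum_map_range', show 1 + (m - 2) = m - 1 from by omega, C3s]
  have hpp : ((List.range' 1 ((m - 1) / 2)).map
        (fun b => ((List.range m).map FA).getD b 0 * ((List.range m).map FA).getD (m - 2 * b) 0)).sum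
      = PPv FA m := by
    have e : ∀ b ∈ List.range' 1 ((m - 1) / 2),
        ((List.range m).map FA).getD b 0 * ((List.range m).map FA).getD (m - 2 * b) 0
        = FA b * FA (m - 2 * b) := by
      intro b hb
      rw [List.mem_range'_1] at hb
      rw [PySem.List.getD_map_range _ _ _ _ (by omega), PySem.List.getD_map_range _ _ _ _ (by omega)]
    rw [List.map_congr_left e, sum_map_range', show 1 + (m - 1) / 2 = (m - 1) / 2 + 1 from by omega, PPv]
  have hp3 : (if m % 3 = 0 then ((List.range m).map FA).getD (m / 3) 0 else 0) = P3v FA m := by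
    unfold P3v
    split_ifs
    · exact PySem.List.getD_map_range _ _ _ _ (by omega)
    · rfl
  rw [hc2, hp2, hc3, hpp, hp3, A2_fdiv FA m (by omega), A3_fdiv FA m hm,
      show A2sum FA m + A3sum FA m = FA m from (FA_eq m (by omega)).symm,
      show A2sum FA m = S2F m from by rw [S2F, if_neg (by omega : ¬ m < 2)],
      List.range_succ, List.map_append, List.map_append]
  rfl

lemma bloop (t : Nat) :
    (List.range' 2 t).foldl set_tap2_altStep ([0, 1], [0, 0])
    = ((List.range (t + 2)).map FA, (List.range (t + 2)).map S2F) := by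
  induction t with
  | zero =>
    rw [show List.range 2 = [0, 1] from rfl]
    simp [FA_zero, FA_one, S2F]
  | succ t ih =>
    rw [List.range'_1_concat, List.foldl_append, ih, List.foldl_cons, List.foldl_nil,
        show 2 + t = t + 2 from by omega, bstep_eq (t + 2) (by omega)]

lemma alt_eq_FA (remain : Int) : set_tap2_alt remain = FA remain.toNat := by
  unfold set_tap2_alt
  by_cases h1 : remain < 1
  · rw [if_pos h1, show remain.toNat = 0 from by omega, FA_zero]
  rw [if_neg h1]
  by_cases h2 : remain = 1
  · rw [if_pos h2, h2, show (1 : Int).toNat = 1 from rfl, FA_one]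
  rw [if_neg h2]
  have hn : 2 ≤ remain.toNat := by omega
  dsimp only
  rw [show remain.toNat - 1 = (remain.toNat - 2) + 1 from by omega, bloop,
      show remain.toNat - 2 + 1 + 2 = remain.toNat + 1 from by omega,
      PySem.List.getD_map_range _ _ _ _ (by omega)]

-- ===== VERDICT (by name: the statement is the Claim_ definition above) =====
theorem set_tap2_spec : Claim_equal_set_tap2 := by
  intro remain _ _
  unfold Spec_set_tap2
  rw [alt_eq_FA]
  unfold set_tap2
  exact (fAm_correct (remain.toNat + 1) remain.toNat (by omega) _ memoOK_init).1
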